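-- pv_equiv track=rewrite | github.com/lfsoftware13/SequenceGraph | common/util.py | create_sentence_pair_same_node_matrix
-- ===== SOURCE A (Python) =====
-- def create_sentence_pair_same_node_matrix(s1, s1_begin, s2, s2_begin):
--     idx = []
--     idy = []
--     data = []
--     for i, t1 in enumerate(s1):
--         for j, t2 in enumerate(s2):
--             if t1 == t2:
--                 idx.append(i+s1_begin)
--                 idy.append(j++s2_begin)
--                 data.append(1)
--     return idx+idy, idy+idx, data+data
-- ===== SOURCE B (Python) =====
-- def create_sentence_pair_same_node_matrix(s1, s1_begin, s2, s2_begin):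
--     pos = {}
--     for j, t in enumerate(s2):
--         pos.setdefault(t, []).append(j + s2_begin)
--     idx = []
--     idy = []
--     for i, t in enumerate(s1):
--         for y in pos.get(t, []):
--             idx.append(i + s1_begin)
--             idy.append(y)
--     data = [1] * len(idx)
--     return idx + idy, idy + idx, data + data
-- ===== Notes on version B (the rewrite author's own statement) =====
-- stated objective: alternative
-- what changed: Replaces the nested scan of s2 for every s1 token by a hash index from s2 token to its (already offset) index list built once, then a single pass over s1 emitting matches; data is produced as [1]*len(idx) instead of per-match appends.
import Mathlib
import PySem

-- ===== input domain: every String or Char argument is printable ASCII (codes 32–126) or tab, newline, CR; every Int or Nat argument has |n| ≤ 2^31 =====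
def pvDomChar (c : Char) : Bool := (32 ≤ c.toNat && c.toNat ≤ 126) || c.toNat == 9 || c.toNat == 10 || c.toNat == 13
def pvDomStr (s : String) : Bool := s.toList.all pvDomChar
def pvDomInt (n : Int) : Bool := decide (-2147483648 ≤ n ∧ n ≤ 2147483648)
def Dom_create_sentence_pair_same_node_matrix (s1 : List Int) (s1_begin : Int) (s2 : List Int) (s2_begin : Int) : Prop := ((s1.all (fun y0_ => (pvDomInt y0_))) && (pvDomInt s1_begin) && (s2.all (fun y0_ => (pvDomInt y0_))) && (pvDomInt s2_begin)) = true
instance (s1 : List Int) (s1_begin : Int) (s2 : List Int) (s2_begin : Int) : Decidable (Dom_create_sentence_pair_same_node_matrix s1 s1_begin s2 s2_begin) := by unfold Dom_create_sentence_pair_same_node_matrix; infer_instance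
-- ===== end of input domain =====

-- B replaces A's nested scan by a hash index of s2 (token -> offset index list) built once plus one pass over s1 (alternative algorithm; cost O(n+m+k) in the number of matches k).

-- ===== PORT A =====
def create_sentence_pair_same_node_matrix (s1 : List Int) (s1_begin : Int) (s2 : List Int) (s2_begin : Int) : List Int × List Int × List Int :=
  let st := (PySem.List.enumerate s1 0).foldl (fun st p =>
      (PySem.List.enumerate s2 0).foldl (fun st q =>
        if p.2 = q.2 then (st.1 ++ [p.1 + s1_begin], st.2.1 ++ [q.1 + s2_begin], st.2.2 ++ [(1 : Int)]) else st) st)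
    (([], [], []) : List Int × List Int × List Int)
  (st.1 ++ st.2.1, st.2.1 ++ st.1, st.2.2 ++ st.2.2)

-- ===== PORT B =====
def create_sentence_pair_same_node_matrix_alt (s1 : List Int) (s1_begin : Int) (s2 : List Int) (s2_begin : Int) : List Int × List Int × List Int :=
  let pos : PySem.Dict Int (List Int) := (PySem.List.enumerate s2 0).foldl
    (fun d q => d.modify q.2 [] (fun ys => ys ++ [q.1 + s2_begin])) PySem.Dict.empty
  let st := (PySem.List.enumerate s1 0).foldl (fun st p =>
      (pos.getD p.2 []).foldl (fun st y => (st.1 ++ [p.1 + s1_begin], st.2 ++ [y])) st)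
    (([], []) : List Int × List Int)
  let data : List Int := List.replicate st.1.length 1
  (st.1 ++ st.2, st.2 ++ st.1, data ++ data)

-- ===== PRECONDITION & SPEC =====
def Spec_create_sentence_pair_same_node_matrix (s1 : List Int) (s1_begin : Int) (s2 : List Int) (s2_begin : Int) (out : List Int × List Int × List Int) : Prop := out = create_sentence_pair_same_node_matrix_alt s1 s1_begin s2 s2_begin
instance (s1 : List Int) (s1_begin : Int) (s2 : List Int) (s2_begin : Int) (out : List Int × List Int × List Int) : Decidable (Spec_create_sentence_pair_same_node_matrix s1 s1_begin s2 s2_begin out) := by unfold Spec_create_sentence_pair_same_node_matrix; infer_instance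

-- ===== CLAIM (what is proved, stated in full; the proofs are below) =====
def Claim_equal_create_sentence_pair_same_node_matrix : Prop := ∀ (s1 : List Int) (s1_begin : Int) (s2 : List Int) (s2_begin : Int), Dom_create_sentence_pair_same_node_matrix s1 s1_begin s2 s2_begin → Spec_create_sentence_pair_same_node_matrix s1 s1_begin s2 s2_begin (create_sentence_pair_same_node_matrix s1 s1_begin s2 s2_begin)

-- ===== LEMMAS AND PROOFS =====

-- the offset s2-positions matching token t, in order
def pvRow (s2_begin : Int) (l : List (Int × Int)) (t : Int) : List Int :=
  l.filterMap (fun q => if t = q.2 then some (q.1 + s2_begin) else none)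

-- the dict built by B's first loop looks up exactly pvRow
theorem pv_dict_row (s2_begin : Int) (l : List (Int × Int)) (d : PySem.Dict Int (List Int)) (t : Int) :
    (l.foldl (fun d q => d.modify q.2 [] (fun ys => ys ++ [q.1 + s2_begin])) d).getD t []
      = d.getD t [] ++ pvRow s2_begin l t := by
  induction l generalizing d with
  | nil => simp [pvRow]
  | cons q l ih =>
    simp only [List.foldl_cons, ih, pvRow, List.filterMap_cons]
    rw [PySem.Dict.getD_modify]
    by_cases h : t = q.2 <;> simp [h]

-- A's inner loop over l appends pvRow-shaped blocks
theorem pv_innerA (s2_begin c : Int) (t : Int) (l : List (Int × Int)) (st : List Int × List Int × List Int) :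
    l.foldl (fun st q => if t = q.2 then (st.1 ++ [c], st.2.1 ++ [q.1 + s2_begin], st.2.2 ++ [(1 : Int)]) else st) st
      = (st.1 ++ List.replicate (pvRow s2_begin l t).length c,
         st.2.1 ++ pvRow s2_begin l t,
         st.2.2 ++ List.replicate (pvRow s2_begin l t).length 1) := by
  induction l generalizing st with
  | nil => simp [pvRow]
  | cons q l ih =>
    simp only [List.foldl_cons]
    rw [ih]
    simp only [pvRow, List.filterMap_cons]
    by_cases h : t = q.2 <;> simp [h, List.replicate_succ, List.append_assoc]

-- B's inner loop over an arbitrary list appends a replicate block and the list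
theorem pv_innerB (c : Int) (ys : List Int) (st : List Int × List Int) :
    ys.foldl (fun st y => (st.1 ++ [c], st.2 ++ [y])) st
      = (st.1 ++ List.replicate ys.length c, st.2 ++ ys) := by
  induction ys generalizing st with
  | nil => simp
  | cons y ys ih =>
    simp only [List.foldl_cons]
    rw [ih]
    simp [List.replicate_succ, List.append_assoc]

-- A's outer loop characterised by flatMap
theorem pv_outerA (s1_begin s2_begin : Int) (l2 : List (Int × Int)) (l : List (Int × Int))
    (st : List Int × List Int × List Int) :
    l.foldl (fun st p =>
        l2.foldl (fun st q =>
          if p.2 = q.2 then (st.1 ++ [p.1 + s1_begin], st.2.1 ++ [q.1 + s2_begin], st.2.2 ++ [(1 : Int)]) else st) st) st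
      = (st.1 ++ l.flatMap (fun p => List.replicate (pvRow s2_begin l2 p.2).length (p.1 + s1_begin)),
         st.2.1 ++ l.flatMap (fun p => pvRow s2_begin l2 p.2),
         st.2.2 ++ l.flatMap (fun p => List.replicate (pvRow s2_begin l2 p.2).length (1 : Int))) := by
  induction l generalizing st with
  | nil => simp
  | cons p l ih =>
    simp only [List.foldl_cons, List.flatMap_cons]
    rw [pv_innerA, ih]
    simp [List.append_assoc]

-- B's outer loop, for any lookup function g
theorem pv_outerB (s1_begin : Int) (g : Int → List Int) (l : List (Int × Int)) (st : List Int × List Int) :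
    l.foldl (fun st p => (g p.2).foldl (fun st y => (st.1 ++ [p.1 + s1_begin], st.2 ++ [y])) st) st
      = (st.1 ++ l.flatMap (fun p => List.replicate (g p.2).length (p.1 + s1_begin)),
         st.2 ++ l.flatMap (fun p => g p.2)) := by
  induction l generalizing st with
  | nil => simp
  | cons p l ih =>
    simp only [List.foldl_cons, List.flatMap_cons]
    rw [pv_innerB, ih]
    simp [List.append_assoc]

-- a flatMap of 1-blocks is a replicate of the matching flatMap's length
theorem pv_ones (l : List (Int × Int)) (f : Int × Int → Nat) (c : Int × Int → Int) :
    l.flatMap (fun p => List.replicate (f p) (1 : Int))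
      = List.replicate (l.flatMap (fun p => List.replicate (f p) (c p))).length 1 := by
  have h1 : ∀ x ∈ l.flatMap (fun p => List.replicate (f p) (1 : Int)), x = (1 : Int) := by
    intro x hx
    simp only [List.mem_flatMap] at hx
    obtain ⟨p, _, hp⟩ := hx
    exact List.eq_of_mem_replicate hp
  rw [List.eq_replicate_of_mem h1]
  congr 1
  simp [List.length_flatMap]

-- ===== VERDICT (by name: the statement is the Claim_ definition above) =====
theorem create_sentence_pair_same_node_matrix_spec : Claim_equal_create_sentence_pair_same_node_matrix := by
  intro s1 s1_begin s2 s2_begin _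
  unfold Spec_create_sentence_pair_same_node_matrix
  unfold create_sentence_pair_same_node_matrix create_sentence_pair_same_node_matrix_alt
  have hg : ∀ t, ((PySem.List.enumerate s2 0).foldl
      (fun d q => d.modify q.2 [] (fun ys => ys ++ [q.1 + s2_begin])) PySem.Dict.empty).getD t []
      = pvRow s2_begin (PySem.List.enumerate s2 0) t := by
    intro t
    rw [pv_dict_row]
    simp
  simp only [hg]
  rw [pv_outerA s1_begin s2_begin (PySem.List.enumerate s2 0),
      pv_outerB s1_begin (fun t => pvRow s2_begin (PySem.List.enumerate s2 0) t)]
  simp only [List.nil_append]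
  rw [pv_ones (PySem.List.enumerate s1 0)
      (fun p => (pvRow s2_begin (PySem.List.enumerate s2 0) p.2).length) (fun p => p.1 + s1_begin)]
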